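-- pv_equiv track=rewrite | github.com/rubelw/OSSS | src/OSSS/ai/agents/query_data/handlers/hr_employees_handler.py | _select_hr_employees_fields
-- ===== SOURCE A (Python) =====
-- from typing import Any, Dict, List, Sequence
--
-- def _select_hr_employees_fields(
--     rows: Sequence[Dict[str, Any]],
-- ) -> List[str]:
--     if not rows:
--         return []
--
--     preferred_order = [
--         "id",
--         "employee_number",
--         "employee_code",
--         "first_name",
--         "last_name",
--         "full_name",
--         "email",
--         "phone",
--         "status",
--         "job_title",
--         "building",
--         "department",
--         "hire_date",
--         "termination_date",
--         "supervisor_id",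
--         "supervisor_name",
--         "is_substitute",
--         "is_contractor",
--         "created_at",
--         "updated_at",
--     ]
--
--     all_keys: List[str] = []
--     for r in rows:
--         for k in r.keys():
--             if k not in all_keys:
--                 all_keys.append(k)
--
--     ordered = [k for k in preferred_order if k in all_keys]
--     ordered.extend(k for k in all_keys if k not in ordered)
--     return ordered
-- ===== SOURCE B (Python) =====
-- from typing import Any, Dict, List, Sequence
--
--
-- def _select_hr_employees_fields(
--     rows: Sequence[Dict[str, Any]],
-- ) -> List[str]:
--     preferred_order = [
--         "id",
--         "employee_number",
--         "employee_code",
--         "first_name",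
--         "last_name",
--         "full_name",
--         "email",
--         "phone",
--         "status",
--         "job_title",
--         "building",
--         "department",
--         "hire_date",
--         "termination_date",
--         "supervisor_id",
--         "supervisor_name",
--         "is_substitute",
--         "is_contractor",
--         "created_at",
--         "updated_at",
--     ]
--     rank = {k: i for i, k in enumerate(preferred_order)}
--     sentinel = len(preferred_order)
--     all_keys = list(dict.fromkeys(k for r in rows for k in r))
--     return sorted(all_keys, key=lambda k: rank.get(k, sentinel))
-- ===== Notes on version B (the rewrite author's own statement) =====
-- stated objective: faster
-- what changed: Replaces A's two-pass partition (quadratic 'k not in all_keys' / 'k not in ordered' list scans, then a preferred-filter pass plus an extend pass) by a dict.fromkeys hash dedup and ONE stable sort under a precomputed rank dict with a common sentinel rank for non-preferred keys.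
import Mathlib
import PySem

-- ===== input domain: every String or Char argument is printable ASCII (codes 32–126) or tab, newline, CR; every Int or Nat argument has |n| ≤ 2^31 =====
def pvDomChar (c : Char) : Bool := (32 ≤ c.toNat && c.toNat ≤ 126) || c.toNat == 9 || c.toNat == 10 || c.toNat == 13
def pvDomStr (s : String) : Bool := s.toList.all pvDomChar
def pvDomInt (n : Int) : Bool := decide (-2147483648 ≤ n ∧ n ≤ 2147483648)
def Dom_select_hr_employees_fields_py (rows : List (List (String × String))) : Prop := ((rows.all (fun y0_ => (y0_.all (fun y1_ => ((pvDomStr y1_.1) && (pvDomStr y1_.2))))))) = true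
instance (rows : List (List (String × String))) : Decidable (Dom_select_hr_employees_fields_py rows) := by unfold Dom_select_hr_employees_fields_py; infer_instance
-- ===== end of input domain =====

-- B replaces A's two-pass preferred/rest partition (with its quadratic `k not in all_keys` /
-- `k not in ordered` list scans) by one dedup plus a single stable sort under a rank table
-- (each preferred key ranked by index, every other key ranked by the common sentinel);
-- objective: faster (A's list-membership dedup/extend scans are quadratic in the number of
-- distinct keys; B is a hash dedup plus one O(n log n) sort — measured faster by the check).

-- ===== PORT A =====
def select_hr_employees_fields_py (rows : List (List (String × String))) : List String :=
  if rows = [] then []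
  else
    let preferred_order : List String :=
      ["id", "employee_number", "employee_code", "first_name", "last_name", "full_name",
       "email", "phone", "status", "job_title", "building", "department", "hire_date",
       "termination_date", "supervisor_id", "supervisor_name", "is_substitute",
       "is_contractor", "created_at", "updated_at"]
    -- for r in rows: for k in r.keys(): if k not in all_keys: all_keys.append(k)
    let all_keys : List String :=
      rows.foldl (fun acc r =>
        ((PySem.Dict.mk r).keys).foldl (fun a k => if k ∈ a then a else a ++ [k]) acc) []
    -- ordered = [k for k in preferred_order if k in all_keys]
    let ordered : List String := preferred_order.filter (fun k => decide (k ∈ all_keys))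
    -- ordered.extend(k for k in all_keys if k not in ordered)  (the generator sees the growing list)
    all_keys.foldl (fun o k => if k ∈ o then o else o ++ [k]) ordered

-- ===== PORT B =====
def select_hr_employees_fields_py_alt (rows : List (List (String × String))) : List String :=
  let preferred_order : List String :=
    ["id", "employee_number", "employee_code", "first_name", "last_name", "full_name",
     "email", "phone", "status", "job_title", "building", "department", "hire_date",
     "termination_date", "supervisor_id", "supervisor_name", "is_substitute",
     "is_contractor", "created_at", "updated_at"]
  -- rank = {k: i for i, k in enumerate(preferred_order)}
  let rank : PySem.Dict String Int :=
    (PySem.List.enumerate preferred_order 0).foldl (fun d p => d.insert p.2 p.1) PySem.Dict.empty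
  let sentinel : Int := PySem.List.len preferred_order
  -- all_keys = list(dict.fromkeys(k for r in rows for k in r))
  let all_keys : List String := PySem.List.dedup (rows.flatMap (fun r => r.map Prod.fst))
  -- sorted(all_keys, key=lambda k: rank.get(k, sentinel))
  PySem.List.sorted all_keys (fun k => rank.getD k sentinel) false

-- ===== PRECONDITION & SPEC =====
def Spec_select_hr_employees_fields_py (rows : List (List (String × String))) (out : List String) : Prop := out = select_hr_employees_fields_py_alt rows
instance (rows : List (List (String × String))) (out : List String) : Decidable (Spec_select_hr_employees_fields_py rows out) := by unfold Spec_select_hr_employees_fields_py; infer_instance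

-- ===== CLAIM (what is proved, stated in full; the proofs are below) =====
def Claim_equal_select_hr_employees_fields_py : Prop := ∀ (rows : List (List (String × String))), Dom_select_hr_employees_fields_py rows → Spec_select_hr_employees_fields_py rows (select_hr_employees_fields_py rows)

-- ===== LEMMAS AND PROOFS =====

-- folding over a flatMap is the nested fold
lemma pv_foldl_flatMap (g : List (String × String) → List String)
    (f : List String → String → List String) (l : List (List (String × String))) (init : List String) :
    (l.flatMap g).foldl f init = l.foldl (fun acc r => (g r).foldl f acc) init := by
  induction l generalizing init with
  | nil => simp
  | cons a l ih => simp [List.foldl_append, ih]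

-- PySem.Set.add written with a propositional membership test
lemma pv_set_add_eq :
    (PySem.Set.add : PySem.Set String → String → PySem.Set String)
      = fun o k => if k ∈ o then o else o ++ [k] := by
  funext o k
  by_cases h : k ∈ o <;> simp [PySem.Set.add, PySem.Set.contains, h]

-- A's `ordered.extend(k for k in all_keys if k not in ordered)` loop on a duplicate-free list
lemma pv_extend_loop (A : List String) :
    ∀ (o : List String), A.Nodup →
      A.foldl (fun o k => if k ∈ o then o else o ++ [k]) o
        = o ++ A.filter (fun k => decide (k ∉ o)) := by
  induction A with
  | nil => intro o _; simp
  | cons a A ih =>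
    intro o h
    rw [List.nodup_cons] at h
    obtain ⟨ha, hA⟩ := h
    by_cases hao : a ∈ o
    · simp only [List.foldl_cons, if_pos hao, List.filter_cons]
      simp [hao, ih o hA]
    · simp only [List.foldl_cons, if_neg hao, List.filter_cons]
      rw [ih (o ++ [a]) hA]
      have hf : A.filter (fun k => !decide (k ∈ o) && !decide (k = a))
          = A.filter (fun k => !decide (k ∈ o)) := by
        apply List.filter_congr; intro k hk
        have hka : decide (k = a) = false := by
          simp only [decide_eq_false_iff_not]; exact fun e => ha (e ▸ hk)
        simp [hka]
      simp [hao, hf]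

lemma pv_insertBy_cons (before : String → String → Bool) (x y : String) (ys : List String) :
    PySem.List.insertBy before x (y :: ys)
      = if before x y then x :: y :: ys else y :: PySem.List.insertBy before x ys := rfl

lemma pv_insertBy_front (before : String → String → Bool) (x : String) (L : List String)
    (h : ∀ y ∈ L, before x y = true) : PySem.List.insertBy before x L = x :: L := by
  cases L with
  | nil => rfl
  | cons y ys => rw [pv_insertBy_cons, if_pos (h y (by simp))]

-- inserting a preferred key into (preferred-part ++ rest) lands exactly where the filter puts it
lemma pv_insert_filter (key : String → Int) (x : String) (rest : List String)
    (hrest : ∀ y ∈ rest, key x < key y) :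
    ∀ (P : List String), P.Pairwise (fun a b => key a < key b) → x ∈ P →
    ∀ (u : List String), x ∉ u →
    PySem.List.insertBy (fun a b => decide (key a < key b)) x
        (P.filter (fun k => decide (k ∈ u)) ++ rest)
      = P.filter (fun k => decide (k ∈ u ++ [x])) ++ rest := by
  intro P
  induction P with
  | nil => intro _ hx; simp at hx
  | cons p P ih =>
    intro hpw hx u hxu
    rw [List.pairwise_cons] at hpw
    obtain ⟨hp, hPw⟩ := hpw
    by_cases hxp : x = p
    · subst hxp
      have hxP : x ∉ P := fun hm => absurd (hp x hm) (lt_irrefl _)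
      have h1 : P.filter (fun k => decide (k ∈ u ++ [x])) = P.filter (fun k => decide (k ∈ u)) := by
        apply List.filter_congr; intro k hk
        have hkx : k ≠ x := fun e => hxP (e ▸ hk)
        simp [List.mem_append, hkx]
      have e1 : (x :: P).filter (fun k => decide (k ∈ u)) = P.filter (fun k => decide (k ∈ u)) := by
        rw [List.filter_cons, if_neg (by simp [hxu])]
      have e2 : (x :: P).filter (fun k => decide (k ∈ u ++ [x]))
          = x :: P.filter (fun k => decide (k ∈ u)) := by
        rw [List.filter_cons, if_pos (by simp), h1]
      have hall : ∀ y ∈ P.filter (fun k => decide (k ∈ u)) ++ rest,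
          (fun a b => decide (key a < key b)) x y = true := by
        intro y hy
        rcases List.mem_append.mp hy with h | h
        · exact decide_eq_true (hp y (List.mem_of_mem_filter h))
        · exact decide_eq_true (hrest y h)
      rw [e1, e2, pv_insertBy_front _ _ _ hall, List.cons_append]
    · have hx' : x ∈ P := by
        rcases List.mem_cons.mp hx with h | h
        · exact absurd h hxp
        · exact h
      have hbf : decide (key x < key p) = false := by
        simp only [decide_eq_false_iff_not, not_lt]
        exact le_of_lt (hp x hx')
      have hpx : p ≠ x := fun e => hxp e.symm
      by_cases hpu : p ∈ u
      · have e1 : (p :: P).filter (fun k => decide (k ∈ u))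
            = p :: P.filter (fun k => decide (k ∈ u)) := by
          rw [List.filter_cons, if_pos (by simp [hpu])]
        have e2 : (p :: P).filter (fun k => decide (k ∈ u ++ [x]))
            = p :: P.filter (fun k => decide (k ∈ u ++ [x])) := by
          rw [List.filter_cons, if_pos (by simp [hpu])]
        rw [e1, e2, List.cons_append, pv_insertBy_cons, hbf, if_neg (by simp),
          List.cons_append, ih hPw hx' u hxu]
      · have e1 : (p :: P).filter (fun k => decide (k ∈ u))
            = P.filter (fun k => decide (k ∈ u)) := by
          rw [List.filter_cons, if_neg (by simp [hpu])]
        have e2 : (p :: P).filter (fun k => decide (k ∈ u ++ [x]))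
            = P.filter (fun k => decide (k ∈ u ++ [x])) := by
          rw [List.filter_cons, if_neg (by simp [hpu, hpx])]
        rw [e1, e2, ih hPw hx' u hxu]

-- the stable insertion sort under a (rank / sentinel) key is the preferred/rest partition
lemma pv_sort_loop (key : String → Int) (s : Int) (P : List String)
    (hpw : P.Pairwise (fun a b => key a < key b))
    (hin : ∀ k ∈ P, key k < s) (hout : ∀ k, k ∉ P → key k = s) :
    ∀ (A : List String), A.Nodup →
      A.foldl (fun acc x => PySem.List.insertBy (fun a b => decide (key a < key b)) x acc) []
        = P.filter (fun k => decide (k ∈ A)) ++ A.filter (fun k => decide (k ∉ P)) := by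
  intro A
  induction A using List.reverseRecOn with
  | nil => simp
  | append_singleton A x ih =>
    intro h
    have hA : A.Nodup := (List.nodup_append.mp h).1
    have hxA : x ∉ A := by
      intro hm
      exact List.disjoint_of_nodup_append h hm (by simp)
    rw [List.foldl_append, ih hA, List.foldl_cons, List.foldl_nil]
    by_cases hxP : x ∈ P
    · have e2 : (A ++ [x]).filter (fun k => decide (k ∉ P)) = A.filter (fun k => decide (k ∉ P)) := by
        simp [List.filter_append, hxP]
      rw [e2]
      exact pv_insert_filter key x (A.filter (fun k => decide (k ∉ P)))
        (fun y hy => by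
          have hyP : y ∉ P := by simpa using List.of_mem_filter hy
          rw [hout y hyP]; exact hin x hxP)
        P hpw hxP A hxA
    · have hall : ∀ y ∈ P.filter (fun k => decide (k ∈ A)) ++ A.filter (fun k => decide (k ∉ P)),
          (fun a b => decide (key a < key b)) x y = false := by
        intro y hy
        simp only [decide_eq_false_iff_not, not_lt]
        rcases List.mem_append.mp hy with h | h
        · rw [hout x hxP]; exact le_of_lt (hin y (List.mem_of_mem_filter h))
        · have hyP : y ∉ P := by simpa using List.of_mem_filter h
          rw [hout x hxP, hout y hyP]
      have e1 : P.filter (fun k => decide (k ∈ A ++ [x])) = P.filter (fun k => decide (k ∈ A)) := by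
        apply List.filter_congr; intro k hk
        have hkx : k ≠ x := fun e => hxP (e ▸ hk)
        simp [List.mem_append, hkx]
      have e2 : (A ++ [x]).filter (fun k => decide (k ∉ P))
          = A.filter (fun k => decide (k ∉ P)) ++ [x] := by
        simp [List.filter_append, hxP]
      rw [PySem.List.insertBy_of_forall_not_before _ _ _ hall, e1, e2, List.append_assoc]

-- the concrete rank dict, evaluated once
def pvRankLit : PySem.Dict String Int :=
  PySem.Dict.mk [("id", 0), ("employee_number", 1), ("employee_code", 2), ("first_name", 3),
    ("last_name", 4), ("full_name", 5), ("email", 6), ("phone", 7), ("status", 8),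
    ("job_title", 9), ("building", 10), ("department", 11), ("hire_date", 12),
    ("termination_date", 13), ("supervisor_id", 14), ("supervisor_name", 15),
    ("is_substitute", 16), ("is_contractor", 17), ("created_at", 18), ("updated_at", 19)]

def pvPref : List String :=
  ["id", "employee_number", "employee_code", "first_name", "last_name", "full_name",
   "email", "phone", "status", "job_title", "building", "department", "hire_date",
   "termination_date", "supervisor_id", "supervisor_name", "is_substitute",
   "is_contractor", "created_at", "updated_at"]

lemma pv_rank_eq :
    (PySem.List.enumerate pvPref 0).foldl (fun d p => d.insert p.2 p.1) PySem.Dict.empty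
      = pvRankLit := by decide

lemma pv_rank_out : ∀ k, k ∉ pvPref → pvRankLit.getD k 20 = 20 := by
  intro k hk
  apply PySem.Dict.getD_of_not_contains
  rw [PySem.Dict.contains_eq_decide_mem_keys]
  simp only [decide_eq_false_iff_not]
  intro hm
  exact hk (by simpa [pvRankLit, PySem.Dict.keys, pvPref] using hm)

-- ===== VERDICT (by name: the statement is the Claim_ definition above) =====
theorem select_hr_employees_fields_py_spec : Claim_equal_select_hr_employees_fields_py := by
  intro rows _
  unfold Spec_select_hr_employees_fields_py
  by_cases hrows : rows = []
  · subst hrows; rfl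
  · simp only [select_hr_employees_fields_py, select_hr_employees_fields_py_alt, if_neg hrows]
    have hAK :
        rows.foldl (fun acc r =>
            ((PySem.Dict.mk r).keys).foldl (fun a k => if k ∈ a then a else a ++ [k]) acc) []
          = PySem.List.dedup (rows.flatMap (fun r => r.map Prod.fst)) := by
      rw [PySem.List.dedup_eq_ofList, PySem.Set.ofList_eq_foldl, pv_foldl_flatMap, pv_set_add_eq]
      rfl
    set AK := PySem.List.dedup (rows.flatMap (fun r => r.map Prod.fst)) with hAKdef
    have hnd : AK.Nodup := by
      rw [hAKdef, PySem.List.dedup_eq_ofList]; exact PySem.Set.nodup_ofList _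
    rw [hAK, pv_extend_loop AK _ hnd]
    have hfc : AK.filter (fun k => decide (k ∉ pvPref.filter (fun k => decide (k ∈ AK))))
        = AK.filter (fun k => decide (k ∉ pvPref)) := by
      apply List.filter_congr; intro k hk
      simp [List.mem_filter, hk]
    rw [show
        (["id", "employee_number", "employee_code", "first_name", "last_name", "full_name",
          "email", "phone", "status", "job_title", "building", "department", "hire_date",
          "termination_date", "supervisor_id", "supervisor_name", "is_substitute",
          "is_contractor", "created_at", "updated_at"] : List String) = pvPref from rfl,
      hfc, PySem.List.sorted_eq_foldl_insertBy, pv_rank_eq,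
      show PySem.List.len pvPref = 20 from rfl]
    exact (pv_sort_loop (fun k => pvRankLit.getD k 20) 20 pvPref
      (by decide) (by decide) pv_rank_out AK hnd).symm
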